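-- pv_equiv track=rewrite | github.com/ivangorcanuk/hakaton | хакатон 01.07.2022.py | listVdict
-- ===== SOURCE A (Python) =====
-- def listVdict(spisok):
--     slovar = {}
--     for i in range(len(spisok)):  # переписываем список в словарь
--         f = []
--         if spisok[i].strip().isalpha():
--             for j in range(i + 1, len(spisok)):
--                 if spisok[j].strip().isalpha():
--                     break
--                 f.append(spisok[j].strip())
--             slovar[spisok[i].strip()] = f
--     return slovar
-- ===== SOURCE B (Python) =====
-- def listVdict(spisok):
--     slovar = {}
--     key = None
--     acc = []
--     for line in spisok:
--         s = line.strip()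
--         if s.isalpha():
--             if key is not None:
--                 slovar[key] = acc
--             key, acc = s, []
--         elif key is not None:
--             acc.append(s)
--     if key is not None:
--         slovar[key] = acc
--     return slovar
-- ===== Notes on version B (the rewrite author's own statement) =====
-- stated objective: faster
-- what changed: Replaces A's nested rescan (for every alpha header, re-scan the whole tail until the next header) by one linear pass that accumulates the pending header's lines and flushes them into the dict at the next header or at the end.
import Mathlib
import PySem

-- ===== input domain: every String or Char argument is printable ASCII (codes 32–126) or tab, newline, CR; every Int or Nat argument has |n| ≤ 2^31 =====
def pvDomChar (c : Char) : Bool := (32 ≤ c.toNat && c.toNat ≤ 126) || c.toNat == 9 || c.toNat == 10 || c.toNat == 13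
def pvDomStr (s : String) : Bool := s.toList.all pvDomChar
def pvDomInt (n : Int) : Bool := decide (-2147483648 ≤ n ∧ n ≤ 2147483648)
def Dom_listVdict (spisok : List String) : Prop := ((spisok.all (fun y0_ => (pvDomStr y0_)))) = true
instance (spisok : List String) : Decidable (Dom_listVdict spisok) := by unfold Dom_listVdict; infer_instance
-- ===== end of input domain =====

-- B replaces A's quadratic nested rescan by a single pass that flushes the pending (header, lines) pair into the dict; objective: faster.

-- ===== PORT A =====
-- A's inner loop: from index i+1, collect stripped lines until the next alpha header (the suffix after position i is `rest`).
def pvInnerA : List String → List String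
  | [] => []
  | x :: xs =>
    if PySem.Str.strIsalpha (PySem.Str.strip x) then []
    else PySem.Str.strip x :: pvInnerA xs

-- A's outer loop over i in range(len(spisok)); iteration i sees spisok[i] = head of the remaining suffix and scans from i+1 = its tail.
def pvAGo (d : PySem.Dict String (List String)) : List String → PySem.Dict String (List String)
  | [] => d
  | x :: xs =>
    pvAGo (if PySem.Str.strIsalpha (PySem.Str.strip x)
           then d.insert (PySem.Str.strip x) (pvInnerA xs)
           else d) xs

def listVdict (spisok : List String) : List (String × List String) :=
  (pvAGo PySem.Dict.empty spisok).items

-- ===== PORT B =====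
-- B's single pass: `key`/`acc` hold the pending header and its collected lines; flushed on the next header and once at the end.
def pvBGo (d : PySem.Dict String (List String)) (key : Option String) (acc : List String) :
    List String → PySem.Dict String (List String)
  | [] =>
    match key with
    | some k => d.insert k acc
    | none => d
  | x :: xs =>
    let s := PySem.Str.strip x
    if PySem.Str.strIsalpha s then
      pvBGo (match key with
             | some k => d.insert k acc
             | none => d) (some s) [] xs
    else
      match key with
      | some _ => pvBGo d key (acc ++ [s]) xs
      | none => pvBGo d none acc xs

def listVdict_alt (spisok : List String) : List (String × List String) :=
  (pvBGo PySem.Dict.empty none [] spisok).items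

-- ===== PRECONDITION & SPEC =====
def Spec_listVdict (spisok : List String) (out : List (String × List String)) : Prop := out = listVdict_alt spisok
instance (spisok : List String) (out : List (String × List String)) : Decidable (Spec_listVdict spisok out) := by unfold Spec_listVdict; infer_instance

-- ===== CLAIM (what is proved, stated in full; the proofs are below) =====
def Claim_equal_listVdict : Prop := ∀ (spisok : List String), Dom_listVdict spisok → Spec_listVdict spisok (listVdict spisok)

-- ===== LEMMAS AND PROOFS =====
-- With a pending header k and collected lines acc, B's pass equals A's loop run on the
-- same suffix from a dict already holding k ↦ acc ++ (the lines A's inner scan collects).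
theorem pvBGo_some (xs : List String) :
    ∀ (d : PySem.Dict String (List String)) (k : String) (acc : List String),
      pvBGo d (some k) acc xs = pvAGo (d.insert k (acc ++ pvInnerA xs)) xs := by
  induction xs with
  | nil => intro d k acc; simp [pvBGo, pvAGo, pvInnerA]
  | cons x xs ih =>
    intro d k acc
    by_cases h : PySem.Chars.strIsalpha (PySem.Chars.strip x.toList) = true
    · simp [pvBGo, pvAGo, pvInnerA, h, ih]
    · simp [pvBGo, pvAGo, pvInnerA, h, ih]

theorem pvBGo_none (xs : List String) :
    ∀ (d : PySem.Dict String (List String)) (acc : List String),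
      pvBGo d none acc xs = pvAGo d xs := by
  induction xs with
  | nil => intro d acc; simp [pvBGo, pvAGo]
  | cons x xs ih =>
    intro d acc
    by_cases h : PySem.Chars.strIsalpha (PySem.Chars.strip x.toList) = true
    · simp [pvBGo, pvAGo, h, pvBGo_some]
    · simp [pvBGo, pvAGo, h, ih]

-- ===== VERDICT (by name: the statement is the Claim_ definition above) =====
theorem listVdict_spec : Claim_equal_listVdict := by
  intro spisok _
  unfold Spec_listVdict listVdict listVdict_alt
  rw [pvBGo_none]
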